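-- pv_equiv track=rewrite | github.com/CharlieSL1/CStore | Convertor/Cab-Rewriter.py | collect_instr_names
-- ===== SOURCE A (Python) =====
-- def collect_instr_names(lines):
--     names = []
--     seen = set()
--     for ln in lines:
--         s = ln.strip()
--         if s.startswith("instr "):
--             parts = s.split()
--             if len(parts) >= 2:
--                 name = parts[1].strip().strip('"')
--                 if name and name not in seen:
--                     seen.add(name)
--                     names.append(name)
--     return names
-- ===== SOURCE B (Python) =====
-- def collect_instr_names(lines):
--     # Phase 1: extract every qualifying name, duplicates included, in order.
--     cands = []
--     for ln in lines:
--         s = ln.strip()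
--         if s.startswith("instr "):
--             parts = s.split()
--             if len(parts) >= 2:
--                 n = parts[1].strip().strip('"')
--                 if n:
--                     cands.append(n)
--     # Phase 2: keep first occurrences by repeatedly taking the head and
--     # filtering all its later duplicates out of the remainder (no seen-set).
--     out = []
--     while cands:
--         head = cands[0]
--         out.append(head)
--         cands = [c for c in cands[1:] if c != head]
--     return out
-- ===== Notes on version B (the rewrite author's own statement) =====
-- stated objective: alternative
-- what changed: A interleaves parsing with a seen-set/output pair in one loop; B first extracts all qualifying names with duplicates, then deduplicates with a seen-set-free head-and-filter pass that repeatedly takes the first remaining candidate and filters its duplicates out of the rest.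
import Mathlib
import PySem

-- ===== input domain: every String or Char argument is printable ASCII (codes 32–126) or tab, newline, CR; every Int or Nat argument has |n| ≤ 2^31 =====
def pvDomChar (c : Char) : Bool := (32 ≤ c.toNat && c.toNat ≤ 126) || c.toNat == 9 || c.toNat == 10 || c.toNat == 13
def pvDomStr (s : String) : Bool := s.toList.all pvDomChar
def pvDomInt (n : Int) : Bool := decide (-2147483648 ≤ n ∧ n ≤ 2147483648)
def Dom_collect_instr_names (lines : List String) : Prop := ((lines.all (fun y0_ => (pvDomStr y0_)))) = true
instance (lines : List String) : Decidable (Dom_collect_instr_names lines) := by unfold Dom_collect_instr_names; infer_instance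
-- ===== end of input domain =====

-- B splits A's single interleaved loop (seen-set + output) into two phases: extract ALL
-- qualifying names (duplicates kept), then deduplicate without any seen-set by repeatedly
-- taking the head and filtering its duplicates out of the remainder (alternative decomposition).

-- ===== PORT A =====
def collect_instr_names (lines : List String) : List String :=
  (lines.foldl (fun (st : List String × PySem.Set String) ln =>
    let names := st.1
    let seen := st.2
    let s := PySem.Str.strip ln
    if PySem.Str.startswith s "instr " then
      let parts := PySem.Str.split₀ s
      if parts.length ≥ 2 then
        let name := PySem.Str.stripChars (PySem.Str.strip (PySem.List.pyGetD parts 1 "")) "\""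
        if name ≠ "" ∧ ¬ PySem.Set.contains seen name then
          (names ++ [name], PySem.Set.add seen name)
        else (names, seen)
      else (names, seen)
    else (names, seen)) ([], ([] : PySem.Set String))).1

-- ===== PORT B =====
-- phase 1 loop body: append the qualifying name of one line (if any), duplicates kept
def stepC (acc : List String) (ln : String) : List String :=
  let s := PySem.Str.strip ln
  if PySem.Str.startswith s "instr " then
    let parts := PySem.Str.split₀ s
    if parts.length ≥ 2 then
      let n := PySem.Str.stripChars (PySem.Str.strip (PySem.List.pyGetD parts 1 "")) "\""
      if n ≠ "" then acc ++ [n] else acc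
    else acc
  else acc

def candsB (lines : List String) : List String := lines.foldl stepC []

-- phase 2: head-and-filter dedup (Source B's while loop, as the same recursion on the list)
def firstsB : List String → List String
  | [] => []
  | h :: t => h :: firstsB (t.filter (fun c => c ≠ h))
termination_by cs => cs.length
decreasing_by
  simpa using Nat.lt_succ_of_le ((List.length_filter_le _ t.attach).trans (le_of_eq List.length_attach))

def collect_instr_names_alt (lines : List String) : List String :=
  firstsB (candsB lines)

-- ===== PRECONDITION & SPEC =====
def Spec_collect_instr_names (lines : List String) (out : List String) : Prop := out = collect_instr_names_alt lines
instance (lines : List String) (out : List String) : Decidable (Spec_collect_instr_names lines out) := by unfold Spec_collect_instr_names; infer_instance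

-- ===== CLAIM (what is proved, stated in full; the proofs are below) =====
def Claim_equal_collect_instr_names : Prop := ∀ (lines : List String), Dom_collect_instr_names lines → Spec_collect_instr_names lines (collect_instr_names lines)

-- ===== LEMMAS AND PROOFS =====

-- A's loop body, named for the proofs
def stepF (st : List String × PySem.Set String) (ln : String) : List String × PySem.Set String :=
  let names := st.1
  let seen := st.2
  let s := PySem.Str.strip ln
  if PySem.Str.startswith s "instr " then
    let parts := PySem.Str.split₀ s
    if parts.length ≥ 2 then
      let name := PySem.Str.stripChars (PySem.Str.strip (PySem.List.pyGetD parts 1 "")) "\""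
      if name ≠ "" ∧ ¬ PySem.Set.contains seen name then
        (names ++ [name], PySem.Set.add seen name)
      else (names, seen)
    else (names, seen)
  else (names, seen)

lemma collectA_eq (lines : List String) :
    collect_instr_names lines = (lines.foldl stepF ([], ([] : PySem.Set String))).1 := rfl

-- per-line contribution of B's phase 1
def fcand (ln : String) : List String :=
  let s := PySem.Str.strip ln
  if PySem.Str.startswith s "instr " then
    let parts := PySem.Str.split₀ s
    if parts.length ≥ 2 then
      let n := PySem.Str.stripChars (PySem.Str.strip (PySem.List.pyGetD parts 1 "")) "\""
      if n ≠ "" then [n] else []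
    else []
  else []

lemma stepC_eq (acc : List String) (ln : String) : stepC acc ln = acc ++ fcand ln := by
  simp only [stepC, fcand]
  by_cases hs : PySem.Str.startswith (PySem.Str.strip ln) "instr " = true
  · rw [if_pos hs, if_pos hs]
    by_cases hl : (PySem.Str.split₀ (PySem.Str.strip ln)).length ≥ 2
    · rw [if_pos hl, if_pos hl]
      by_cases hn : PySem.Str.stripChars (PySem.Str.strip
          (PySem.List.pyGetD (PySem.Str.split₀ (PySem.Str.strip ln)) 1 "")) "\"" = ""
      · rw [if_neg (fun h => h hn), if_neg (fun h => h hn), List.append_nil]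
      · rw [if_pos hn, if_pos hn]
    · rw [if_neg hl, if_neg hl, List.append_nil]
  · rw [if_neg hs, if_neg hs, List.append_nil]

lemma candsB_eq (lines : List String) : candsB lines = lines.flatMap fcand := by
  have h : ∀ (ls acc : List String), ls.foldl stepC acc = acc ++ ls.flatMap fcand := by
    intro ls
    induction ls with
    | nil => intro acc; simp
    | cons ln rest ih =>
      intro acc
      rw [List.foldl_cons, List.flatMap_cons, stepC_eq, ih, List.append_assoc]
  simpa using h lines []

-- A's fold state stays a "same list twice" pair and processes each candidate with Set.add
lemma stepF_pair (s : List String) (ln : String) :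
    stepF (s, s) ln =
      ((fcand ln).foldl PySem.Set.add s, ((fcand ln).foldl PySem.Set.add s : PySem.Set String)) := by
  simp only [stepF, fcand]
  by_cases hs : PySem.Str.startswith (PySem.Str.strip ln) "instr " = true
  · rw [if_pos hs, if_pos hs]
    by_cases hl : (PySem.Str.split₀ (PySem.Str.strip ln)).length ≥ 2
    · rw [if_pos hl, if_pos hl]
      set name := PySem.Str.stripChars (PySem.Str.strip
        (PySem.List.pyGetD (PySem.Str.split₀ (PySem.Str.strip ln)) 1 "")) "\"" with hname
      by_cases hn : name = ""
      · rw [if_neg (fun h => h.1 hn), if_neg (fun h => h hn), List.foldl_nil]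
      · rw [if_pos hn, List.foldl_cons, List.foldl_nil]
        by_cases hc : PySem.Set.contains s name = true
        · rw [if_neg (fun h => h.2 hc)]
          have : PySem.Set.add s name = s := by
            simp only [PySem.Set.add]; rw [if_pos hc]
          rw [this]
        · rw [if_pos ⟨hn, hc⟩]
          have : PySem.Set.add s name = s ++ [name] := by
            simp only [PySem.Set.add]; rw [if_neg hc]
          rw [this]
    · rw [if_neg hl, if_neg hl, List.foldl_nil]
  · rw [if_neg hs, if_neg hs, List.foldl_nil]

lemma loopA (lines : List String) : ∀ (s : List String),
    lines.foldl stepF (s, s) =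
      ((lines.flatMap fcand).foldl PySem.Set.add s,
       (((lines.flatMap fcand).foldl PySem.Set.add s) : PySem.Set String)) := by
  induction lines with
  | nil => intro s; rfl
  | cons ln rest ih =>
    intro s
    rw [List.foldl_cons, stepF_pair, ih, List.flatMap_cons, List.foldl_append]

-- Set.contains is monotone under add
lemma contains_add_of_contains (s : List String) (x c : String)
    (h : PySem.Set.contains s c = true) : PySem.Set.contains (PySem.Set.add s x) c = true := by
  simp only [PySem.Set.add]
  split_ifs with hx
  · exact h
  · simp only [PySem.Set.contains] at h ⊢
    simp only [List.contains_eq_mem, decide_eq_true_eq, List.mem_append, List.mem_singleton] at h ⊢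
    exact Or.inl h

-- elements already in the accumulator can be filtered out before folding Set.add
lemma foldl_add_filter_mem (c : String) :
    ∀ (xs : List String) (s : List String), PySem.Set.contains s c = true →
      xs.foldl PySem.Set.add s = (xs.filter (fun y => y ≠ c)).foldl PySem.Set.add s := by
  intro xs
  induction xs with
  | nil => intro s _; rfl
  | cons x t ih =>
    intro s hs
    rw [List.foldl_cons, List.filter_cons]
    by_cases hx : x = c
    · subst hx
      have : PySem.Set.add s x = s := by simp only [PySem.Set.add]; rw [if_pos hs]
      rw [this, if_neg (by simp)]
      exact ih s hs
    · rw [if_pos (by simp [hx]), List.foldl_cons]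
      exact ih _ (contains_add_of_contains s x c hs)

-- folding over a list avoiding x on a state starting with x just carries x in front
lemma foldl_add_cons_lift (x : String) :
    ∀ (ys : List String) (s : List String), (∀ y ∈ ys, y ≠ x) →
      ys.foldl PySem.Set.add (x :: s) = x :: ys.foldl PySem.Set.add s := by
  intro ys
  induction ys with
  | nil => intro s _; rfl
  | cons y t ih =>
    intro s h
    have hyx : y ≠ x := h y (List.mem_cons_self)
    have hcons : PySem.Set.contains (x :: s) y = PySem.Set.contains s y := by
      simp only [PySem.Set.contains, List.contains_cons]
      have : (y == x) = false := by simpa using hyx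
      rw [this, Bool.false_or]
    have hadd : PySem.Set.add (x :: s) y = x :: PySem.Set.add s y := by
      simp only [PySem.Set.add]
      by_cases hcy : PySem.Set.contains s y = true
      · rw [if_pos (hcons.trans hcy), if_pos hcy]
      · rw [if_neg (fun hh => hcy (hcons ▸ hh)), if_neg hcy]
        rfl
    rw [List.foldl_cons, hadd, List.foldl_cons, ih _ (fun z hz => h z (List.mem_cons_of_mem _ hz))]

-- A's dedup-by-seen-set over the candidate stream equals B's head-and-filter dedup
lemma foldl_add_eq_firstsB (xs : List String) :
    xs.foldl PySem.Set.add ([] : List String) = firstsB xs := by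
  induction hn : xs.length using Nat.strong_induction_on generalizing xs with
  | _ n ih =>
    cases xs with
    | nil => rw [firstsB.eq_def]; rfl
    | cons h t =>
      have hadd : PySem.Set.add ([] : List String) h = [h] := by
        simp [PySem.Set.add, PySem.Set.contains]
      rw [List.foldl_cons, hadd]
      have hc : PySem.Set.contains [h] h = true := by
        simp [PySem.Set.contains]
      rw [foldl_add_filter_mem h t [h] hc]
      have hni : ∀ y ∈ t.filter (fun y => y ≠ h), y ≠ h := by
        intro y hy
        have := List.of_mem_filter hy
        simpa using this
      have hlift := foldl_add_cons_lift h (t.filter (fun y => y ≠ h)) [] hni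
      rw [show ([h] : List String) = h :: ([] : List String) from rfl, hlift]
      rw [ih ((t.filter (fun y => y ≠ h)).length)
            (by subst hn; simpa using Nat.lt_succ_of_le (List.length_filter_le _ _))
            _ rfl]
      conv_rhs => rw [firstsB.eq_def]

-- ===== VERDICT (by name: the statement is the Claim_ definition above) =====
theorem collect_instr_names_spec : Claim_equal_collect_instr_names := by
  intro lines _
  show collect_instr_names lines = collect_instr_names_alt lines
  rw [collectA_eq, loopA lines []]
  show List.foldl PySem.Set.add [] (lines.flatMap fcand) = collect_instr_names_alt lines
  unfold collect_instr_names_alt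
  rw [candsB_eq, foldl_add_eq_firstsB]
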